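-- pv_equiv track=rewrite | github.com/Arsen1302/Code-copy-detector | TestData/solutions/problem_1622_4.py | solution_1622_4
-- ===== SOURCE A (Python) =====
-- def solution_1622_4(nums):
--     ans, count = 0, 1
--     for i in range(len(nums)):
--         if nums[i] == 0:
--             ans += count
--             count += 1
--         else: count = 1
--     return ans
-- ===== SOURCE B (Python) =====
-- def solution_1622_4(nums):
--     ans = run = 0
--     for x in nums:
--         if x == 0:
--             run += 1
--         else:
--             ans += run * (run + 1) // 2
--             run = 0
--     return ans + run * (run + 1) // 2
-- ===== Notes on version B (the rewrite author's own statement) =====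
-- stated objective: alternative
-- what changed: B accumulates the length of each maximal zero-run and adds its triangular number L*(L+1)//2 per run (flushing the last run after the loop), instead of A's per-element incremental ans/count accumulator.
import Mathlib
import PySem

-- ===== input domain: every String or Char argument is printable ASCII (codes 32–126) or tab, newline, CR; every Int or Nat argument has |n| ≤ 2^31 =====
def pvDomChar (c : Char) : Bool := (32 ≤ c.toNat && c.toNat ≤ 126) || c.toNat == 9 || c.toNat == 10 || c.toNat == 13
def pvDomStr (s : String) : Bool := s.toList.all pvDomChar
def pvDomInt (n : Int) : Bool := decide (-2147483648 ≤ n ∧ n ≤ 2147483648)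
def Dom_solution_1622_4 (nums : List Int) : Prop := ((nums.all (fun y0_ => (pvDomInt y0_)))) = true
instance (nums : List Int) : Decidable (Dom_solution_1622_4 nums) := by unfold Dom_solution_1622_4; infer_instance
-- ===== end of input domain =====

-- B replaces A's per-element incremental ans/count accumulator by a per-zero-run
-- closed form (triangular number of each maximal run); objective: alternative.

-- ===== PORT A =====
-- A's loop: state (ans, count), per element add count on a zero else reset count to 1.
def solution_1622_4 (nums : List Int) : Int :=
  (nums.foldl (fun (s : Int × Int) x =>
      if x = 0 then (s.1 + s.2, s.2 + 1) else (s.1, 1)) (0, 1)).1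

-- ===== PORT B =====
-- B's loop: state (ans, run); flush run*(run+1)//2 on a nonzero and once after the loop.
def solution_1622_4_altGo : List Int → Int → Int → Int
  | [], ans, run => ans + PySem.Int.floordiv (run * (run + 1)) 2
  | x :: xs, ans, run =>
    if x = 0 then solution_1622_4_altGo xs ans (run + 1)
    else solution_1622_4_altGo xs (ans + PySem.Int.floordiv (run * (run + 1)) 2) 0

def solution_1622_4_alt (nums : List Int) : Int := solution_1622_4_altGo nums 0 0

-- ===== PRECONDITION & SPEC =====
def Spec_solution_1622_4 (nums : List Int) (out : Int) : Prop := out = solution_1622_4_alt nums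
instance (nums : List Int) (out : Int) : Decidable (Spec_solution_1622_4 nums out) := by unfold Spec_solution_1622_4; infer_instance

-- ===== CLAIM (what is proved, stated in full; the proofs are below) =====
def Claim_equal_solution_1622_4 : Prop := ∀ (nums : List Int), Dom_solution_1622_4 nums → Spec_solution_1622_4 nums (solution_1622_4 nums)

-- ===== LEMMAS AND PROOFS =====
-- triangular number helper
def pvTri (L : Int) : Int := PySem.Int.floordiv (L * (L + 1)) 2

theorem pvTri_eq (L : Int) : pvTri L = (L * (L + 1)) / 2 := by
  unfold pvTri
  exact PySem.Int.floordiv_eq_ediv_of_pos (by norm_num)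

theorem pvTri_succ (L : Int) : pvTri (L + 1) = pvTri L + (L + 1) := by
  rw [pvTri_eq, pvTri_eq]
  have h2 : (L + 1) * (L + 1 + 1) = L * (L + 1) + 2 * (L + 1) := by ring
  rw [h2]
  omega

theorem pvTri_zero : pvTri 0 = 0 := by decide

-- invariant: for run length L ≥ 0 (A's count = L + 1, A's ans already contains pvTri L),
-- A's fold from that state equals ans - pvTri L + B's remaining sum.
theorem pv_inv (xs : List Int) : ∀ (ans L : Int), 0 ≤ L →
    (xs.foldl (fun (s : Int × Int) x =>
        if x = 0 then (s.1 + s.2, s.2 + 1) else (s.1, 1)) (ans, L + 1)).1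
      = solution_1622_4_altGo xs (ans - pvTri L) L := by
  induction xs with
  | nil =>
    intro ans L hL
    simp [solution_1622_4_altGo, pvTri]
  | cons x xs ih =>
    intro ans L hL
    simp only [List.foldl_cons, solution_1622_4_altGo]
    by_cases hx : x = 0
    · rw [if_pos hx, if_pos hx, ih (ans + (L + 1)) (L + 1) (by omega), pvTri_succ L]
      congr 1
      ring
    · rw [if_neg hx, if_neg hx]
      have h := ih ans 0 le_rfl
      rw [pvTri_zero, sub_zero] at h
      norm_num at h
      rw [h]
      rw [show PySem.Int.floordiv (L * (L + 1)) 2 = pvTri L from rfl]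
      congr 1
      ring

theorem solution_1622_4_spec : Claim_equal_solution_1622_4 := by
  intro nums _
  unfold Spec_solution_1622_4 solution_1622_4 solution_1622_4_alt
  have := pv_inv nums 0 0 le_rfl
  simpa [pvTri_zero] using this
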